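-- pv_equiv track=rewrite | github.com/kjiyun/Algorithm-Study | Programmers/주식 가격.py | solution
-- ===== SOURCE A (Python) =====
-- def solution(prices):
--     answer = [0]*len(prices)
--
--     stack = []
--     for i in range(len(prices)):
--         while stack and prices[i] < stack[-1][1]:
--             ti, tp = stack.pop()
--             answer[ti] = i - ti
--         stack.append((i, prices[i]))
--
--     for si, _ in stack:
--         answer[si] = len(prices) - si - 1
--
--     return answer
-- ===== SOURCE B (Python) =====
-- def solution(prices):
--     # Naive forward scan: for each day i, count days until a strictly lower price appears.
--     n = len(prices)
--     answer = []
--     for i in range(n):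
--         cnt = 0
--         for j in range(i + 1, n):
--             cnt += 1
--             if prices[j] < prices[i]:
--                 break
--         answer.append(cnt)
--     return answer
-- ===== Notes on version B (the rewrite author's own statement) =====
-- stated objective: alternative
-- what changed: Replaces the monotonic stack (single pass with deferred answer assignments) by a direct nested forward scan that counts, for each day, the days until the first strictly lower price.
import Mathlib
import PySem

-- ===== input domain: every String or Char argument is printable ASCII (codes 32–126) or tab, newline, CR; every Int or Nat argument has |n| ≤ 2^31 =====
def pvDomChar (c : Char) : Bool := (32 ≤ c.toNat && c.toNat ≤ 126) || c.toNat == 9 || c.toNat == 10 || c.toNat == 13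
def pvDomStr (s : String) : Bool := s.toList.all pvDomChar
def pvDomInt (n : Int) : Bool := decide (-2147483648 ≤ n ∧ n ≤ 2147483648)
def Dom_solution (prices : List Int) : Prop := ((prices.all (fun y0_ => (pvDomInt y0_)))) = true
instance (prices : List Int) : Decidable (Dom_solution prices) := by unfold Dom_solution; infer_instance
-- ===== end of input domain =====

-- B replaces A's monotonic stack by a direct nested forward scan (alternative decomposition, not faster).

-- ===== PORT A =====
-- inner while loop: pop while the current price is below the top's price, recording answers
def popWhile (p : Int) (i : Nat) (ans : List Int) : List (Nat × Int) → List Int × List (Nat × Int)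
  | [] => (ans, [])
  | (ti, tp) :: rest =>
      if p < tp then popWhile p i (ans.set ti ((i : Int) - (ti : Int))) rest
      else (ans, (ti, tp) :: rest)

-- one iteration of the main for loop (stack kept head = top)
def stepA (prices : List Int) (st : List Int × List (Nat × Int)) (i : Nat) : List Int × List (Nat × Int) :=
  let p := prices.getD i 0          -- prices[i], i always in range here
  let r := popWhile p i st.1 st.2
  (r.1, (i, p) :: r.2)

def solution (prices : List Int) : List Int :=
  let n := prices.length
  let r := (List.range n).foldl (stepA prices) (List.replicate n 0, [])
  -- final pass over the remaining stack, bottom to top (foldr applies the head = top last)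
  r.2.foldr (fun e a => a.set e.1 ((n : Int) - (e.1 : Int) - 1)) r.1

-- ===== PORT B =====
-- count forward, including the first strictly lower price (loop breaks after incrementing)
def countUntilDrop (p : Int) : List Int → Int
  | [] => 0
  | q :: rest => if q < p then 1 else 1 + countUntilDrop p rest

def solution_alt : List Int → List Int
  | [] => []
  | p :: rest => countUntilDrop p rest :: solution_alt rest

-- ===== PRECONDITION & SPEC =====
def Spec_solution (prices : List Int) (out : List Int) : Prop := out = solution_alt prices
instance (prices : List Int) (out : List Int) : Decidable (Spec_solution prices out) := by unfold Spec_solution; infer_instance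

-- ===== CLAIM (what is proved, stated in full; the proofs are below) =====
def Claim_equal_solution : Prop := ∀ (prices : List Int), Dom_solution prices → Spec_solution prices (solution prices)

-- ===== LEMMAS AND PROOFS =====

-- abbreviation: the price at index m
def gp (prices : List Int) (m : Nat) : Int := prices.getD m 0

-- the value B computes at index j
def Bval (prices : List Int) (j : Nat) : Int := countUntilDrop (gp prices j) (prices.drop (j + 1))

lemma solution_alt_length (l : List Int) : (solution_alt l).length = l.length := by
  induction l with
  | nil => rfl
  | cons p rest ih => simp [solution_alt, ih]

lemma solution_alt_getD (l : List Int) (j : Nat) (hj : j < l.length) :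
    (solution_alt l).getD j 0 = Bval l j := by
  induction l generalizing j with
  | nil => simp at hj
  | cons p rest ih =>
      cases j with
      | zero => simp [solution_alt, Bval, gp]
      | succ j =>
          simp only [solution_alt, List.getD_cons_succ]
          rw [ih j (by simpa using hj)]
          simp [Bval, gp]

lemma countUntilDrop_eq_length (p : Int) (l : List Int)
    (h : ∀ m < l.length, ¬ (l.getD m 0 < p)) : countUntilDrop p l = (l.length : Int) := by
  induction l with
  | nil => rfl
  | cons q rest ih =>
      have h0 := h 0 (by simp)
      simp only [List.getD_cons_zero] at h0
      simp only [countUntilDrop, if_neg h0]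
      rw [ih (fun m hm => by simpa using h (m + 1) (by simpa using hm))]
      simp only [List.length_cons]; push_cast; ring

lemma countUntilDrop_eq_first (p : Int) (l : List Int) (t : Nat) (ht : t < l.length)
    (hbefore : ∀ m < t, ¬ (l.getD m 0 < p)) (hat : l.getD t 0 < p) :
    countUntilDrop p l = (t : Int) + 1 := by
  induction l generalizing t with
  | nil => simp at ht
  | cons q rest ih =>
      cases t with
      | zero =>
          simp only [List.getD_cons_zero] at hat
          simp [countUntilDrop, if_pos hat]
      | succ t =>
          have h0 := hbefore 0 (Nat.succ_pos _)
          simp only [List.getD_cons_zero] at h0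
          simp only [countUntilDrop, if_neg h0]
          rw [ih t (by simpa using ht)
              (fun m hm => by simpa using hbefore (m + 1) (by omega))
              (by simpa using hat)]
          push_cast; ring

-- no strictly lower price strictly between j and k
def NoLow (prices : List Int) (j k : Nat) : Prop :=
  ∀ m, j < m → m < k → ¬ (gp prices m < gp prices j)

lemma Bval_of_noLow (prices : List Int) (j : Nat) (hj : j < prices.length)
    (h : NoLow prices j prices.length) :
    Bval prices j = (prices.length : Int) - (j : Int) - 1 := by
  unfold Bval
  rw [countUntilDrop_eq_length]
  · simp only [List.length_drop]; push_cast [Nat.cast_sub (by omega : j + 1 ≤ prices.length)]; ring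
  · intro m hm
    simp only [List.length_drop] at hm
    have : (prices.drop (j + 1)).getD m 0 = gp prices (j + 1 + m) := by
      unfold gp
      rw [List.getD_eq_getElem _ _ (by simp [List.length_drop]; omega),
          List.getD_eq_getElem _ _ (by omega), List.getElem_drop]
    rw [this]
    exact h (j + 1 + m) (by omega) (by omega)

lemma Bval_of_firstDrop (prices : List Int) (j k : Nat) (hjk : j < k) (hk : k < prices.length)
    (h : NoLow prices j k) (hdrop : gp prices k < gp prices j) :
    Bval prices j = (k : Int) - (j : Int) := by
  unfold Bval
  rw [countUntilDrop_eq_first (t := k - j - 1)]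
  · omega
  · simp only [List.length_drop]; omega
  · intro m hm
    have : (prices.drop (j + 1)).getD m 0 = gp prices (j + 1 + m) := by
      unfold gp
      rw [List.getD_eq_getElem _ _ (by simp [List.length_drop]; omega),
          List.getD_eq_getElem _ _ (by omega), List.getElem_drop]
    rw [this]
    exact h (j + 1 + m) (by omega) (by omega)
  · have : (prices.drop (j + 1)).getD (k - j - 1) 0 = gp prices k := by
      unfold gp
      rw [List.getD_eq_getElem _ _ (by simp [List.length_drop]; omega),
          List.getD_eq_getElem _ _ (by omega), List.getElem_drop]
      congr 1; omega
    rw [this]; exact hdrop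

-- stack order invariant: indices strictly decreasing and prices non-increasing from the top (head)
def StkOrd (stk : List (Nat × Int)) : Prop :=
  List.Pairwise (fun a b => b.1 < a.1 ∧ b.2 ≤ a.2) stk

lemma getD_set_self (l : List Int) (t : Nat) (v : Int) (h : t < l.length) :
    (l.set t v).getD t 0 = v := by
  rw [List.getD_eq_getElem _ _ (by simpa using h)]
  simp [h]

lemma getD_set_ne (l : List Int) (t j : Nat) (v : Int) (h : t ≠ j) :
    (l.set t v).getD j 0 = l.getD j 0 := by
  unfold List.getD
  rw [List.getElem?_set_ne h]

-- everything popWhile guarantees, in one induction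
lemma popWhile_spec (p : Int) (i : Nat) (stk : List (Nat × Int)) (ans : List Int)
    (hord : StkOrd stk) (hlt : ∀ e ∈ stk, e.1 < ans.length) :
    (popWhile p i ans stk).1.length = ans.length ∧
    (popWhile p i ans stk).2.Sublist stk ∧
    StkOrd (popWhile p i ans stk).2 ∧
    (∀ e ∈ (popWhile p i ans stk).2, ¬ (p < e.2)) ∧
    (∀ j : Nat, (∀ e ∈ stk, e.1 ≠ j) →
        (popWhile p i ans stk).1.getD j 0 = ans.getD j 0) ∧
    (∀ e ∈ stk, e ∉ (popWhile p i ans stk).2 →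
        p < e.2 ∧ (popWhile p i ans stk).1.getD e.1 0 = (i : Int) - (e.1 : Int)) := by
  induction stk generalizing ans with
  | nil =>
      refine ⟨?_, ?_, ?_, ?_, ?_, ?_⟩ <;> simp [popWhile, StkOrd]
  | cons hd rest ih =>
      obtain ⟨ti, tp⟩ := hd
      by_cases hp : p < tp
      · have hordr : StkOrd rest := hord.of_cons
        have hhd := (List.pairwise_cons.mp hord).1
        have hlen : (ans.set ti ((i : Int) - (ti : Int))).length = ans.length := by simp
        have hltr : ∀ e ∈ rest, e.1 < (ans.set ti ((i : Int) - (ti : Int))).length := by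
          intro e he; rw [hlen]; exact hlt e (List.mem_cons_of_mem _ he)
        obtain ⟨L, S, O, K, U, P⟩ := ih (ans.set ti ((i : Int) - (ti : Int))) hordr hltr
        have hred : popWhile p i ans ((ti, tp) :: rest)
            = popWhile p i (ans.set ti ((i : Int) - (ti : Int))) rest := by
          simp [popWhile, hp]
        rw [hred]
        refine ⟨by rw [L, hlen], S.trans (List.sublist_cons_self _ _), O, K, ?_, ?_⟩
        · intro j hj
          rw [U j (fun e he => hj e (List.mem_cons_of_mem _ he)),
              getD_set_ne _ _ _ _ (hj (ti, tp) List.mem_cons_self)]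
        · intro e he hne
          rcases List.mem_cons.mp he with rfl | he'
          · refine ⟨hp, ?_⟩
            have hnotmem : ∀ e' ∈ rest, e'.1 ≠ ti := by
              intro e' he'; exact Nat.ne_of_lt (hhd e' he').1
            rw [U ti hnotmem, getD_set_self _ _ _ (hlt (ti, tp) List.mem_cons_self)]
          · exact P e he' hne
      · have hred : popWhile p i ans ((ti, tp) :: rest) = (ans, (ti, tp) :: rest) := by
          simp [popWhile, hp]
        rw [hred]
        refine ⟨rfl, List.Sublist.refl _, hord, ?_, fun j _ => rfl, fun e he hne => absurd he hne⟩
        intro e he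
        rcases List.mem_cons.mp he with rfl | he'
        · exact hp
        · have := ((List.pairwise_cons.mp hord).1 e he').2
          intro hc; exact hp (lt_of_lt_of_le hc this)

-- the full invariant carried through the main for loop
def InvA (prices : List Int) (k : Nat) (st : List Int × List (Nat × Int)) : Prop :=
  st.1.length = prices.length ∧
  StkOrd st.2 ∧
  (∀ e ∈ st.2, e.2 = gp prices e.1 ∧ e.1 < k ∧ NoLow prices e.1 k) ∧
  (∀ j < k, (∀ e ∈ st.2, e.1 ≠ j) → st.1.getD j 0 = Bval prices j)

lemma inv_step (prices : List Int) (k : Nat) (st : List Int × List (Nat × Int))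
    (hk : k < prices.length) (hinv : InvA prices k st) :
    InvA prices (k + 1) (stepA prices st k) := by
  obtain ⟨hlen, hord, hmem, hans⟩ := hinv
  have hlt : ∀ e ∈ st.2, e.1 < st.1.length := by
    intro e he; rw [hlen]; exact lt_trans (hmem e he).2.1 hk
  obtain ⟨L, S, O, K, U, P⟩ := popWhile_spec (prices.getD k 0) k st.2 st.1 hord hlt
  set p := prices.getD k 0 with hpdef
  set r := popWhile p k st.1 st.2 with hrdef
  have hstep : stepA prices st k = (r.1, (k, p) :: r.2) := rfl
  rw [hstep]
  refine ⟨by rw [L, hlen], ?_, ?_, ?_⟩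
  · -- order invariant for the new stack
    refine List.pairwise_cons.mpr ⟨?_, O⟩
    intro e he
    have heo := hmem e (S.mem he)
    exact ⟨heo.2.1, not_lt.mp (K e he)⟩
  · -- membership properties
    intro e he
    rcases List.mem_cons.mp he with rfl | he'
    · exact ⟨rfl, Nat.lt_succ_self _, fun m h1 h2 => absurd (lt_of_lt_of_le h1 (Nat.lt_succ_iff.mp h2)) (lt_irrefl _)⟩
    · obtain ⟨hp, hlt', hnl⟩ := hmem e (S.mem he')
      refine ⟨hp, Nat.lt_succ_of_lt hlt', ?_⟩
      intro m h1 h2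
      rcases Nat.lt_succ_iff_lt_or_eq.mp h2 with h2' | rfl
      · exact hnl m h1 h2'
      · have hnp : ¬ (p < e.2) := K e he'
        rw [hp] at hnp
        exact fun hc => hnp (by simpa [hpdef, gp] using hc)
  · -- answer values for settled indices
    intro j hj hnot
    have hjk : j ≠ k := fun h => (hnot (k, p) List.mem_cons_self) (h ▸ rfl)
    have hjlt : j < k := by omega
    by_cases hin : ∀ e ∈ st.2, e.1 ≠ j
    · rw [U j hin]; exact hans j hjlt hin
    · push_neg at hin
      obtain ⟨e, he, hej⟩ := hin
      have hnotin : e ∉ r.2 := by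
        intro hc; exact (hnot e (List.mem_cons_of_mem _ hc)) hej
      obtain ⟨hp, hval⟩ := P e he hnotin
      obtain ⟨hpe, hek, hnl⟩ := hmem e he
      subst hej
      rw [hval]
      have : gp prices k < gp prices e.1 := by rw [← hpe]; exact hp
      exact (Bval_of_firstDrop prices e.1 k hek hk hnl this).symm

lemma inv_all (prices : List Int) (k : Nat) (hk : k ≤ prices.length) :
    InvA prices k ((List.range k).foldl (stepA prices) (List.replicate prices.length 0, [])) := by
  induction k with
  | zero =>
      refine ⟨by simp, List.Pairwise.nil, by simp, by simp⟩
  | succ k ih =>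
      rw [List.range_succ, List.foldl_append, List.foldl_cons, List.foldl_nil]
      exact inv_step prices k _ (by omega) (ih (by omega))

-- the final pass over the leftover stack
lemma finalPass (prices : List Int) (stk : List (Nat × Int)) (ans : List Int)
    (hord : StkOrd stk)
    (hmem : ∀ e ∈ stk, e.1 < prices.length ∧ NoLow prices e.1 prices.length)
    (hlen : ans.length = prices.length) :
    (stk.foldr (fun e a => a.set e.1 ((prices.length : Int) - (e.1 : Int) - 1)) ans).length = prices.length ∧
    (∀ j : Nat, (∀ e ∈ stk, e.1 ≠ j) →
      (stk.foldr (fun e a => a.set e.1 ((prices.length : Int) - (e.1 : Int) - 1)) ans).getD j 0 = ans.getD j 0) ∧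
    (∀ e ∈ stk,
      (stk.foldr (fun e a => a.set e.1 ((prices.length : Int) - (e.1 : Int) - 1)) ans).getD e.1 0
        = (prices.length : Int) - (e.1 : Int) - 1) := by
  induction stk with
  | nil => exact ⟨hlen, fun j _ => rfl, by simp⟩
  | cons hd rest ih =>
      have hhd := (List.pairwise_cons.mp hord).1
      obtain ⟨L, U, P⟩ := ih hord.of_cons (fun e he => hmem e (List.mem_cons_of_mem _ he))
      simp only [List.foldr_cons]
      refine ⟨by simp [L], ?_, ?_⟩
      · intro j hj
        rw [getD_set_ne _ _ _ _ (hj hd List.mem_cons_self), U j (fun e he => hj e (List.mem_cons_of_mem _ he))]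
      · intro e he
        rcases List.mem_cons.mp he with rfl | he'
        · rw [getD_set_self]
          rw [L]; exact (hmem e List.mem_cons_self).1
        · rw [getD_set_ne _ _ _ _ (Nat.ne_of_lt (hhd e he').1).symm]
          exact P e he'

lemma solution_getD (prices : List Int) :
    (solution prices).length = prices.length ∧
    ∀ j < prices.length, (solution prices).getD j 0 = Bval prices j := by
  obtain ⟨hlen, hord, hmem, hans⟩ := inv_all prices prices.length (le_refl _)
  set st := (List.range prices.length).foldl (stepA prices) (List.replicate prices.length 0, []) with hst
  have hsol : solution prices
      = st.2.foldr (fun e a => a.set e.1 ((prices.length : Int) - (e.1 : Int) - 1)) st.1 := rfl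
  obtain ⟨L, U, P⟩ := finalPass prices st.2 st.1 hord
    (fun e he => ⟨(hmem e he).2.1, (hmem e he).2.2⟩) hlen
  rw [hsol]
  refine ⟨L, ?_⟩
  intro j hj
  by_cases hin : ∀ e ∈ st.2, e.1 ≠ j
  · rw [U j hin]; exact hans j hj hin
  · push_neg at hin
    obtain ⟨e, he, rfl⟩ := hin
    rw [P e he]
    exact (Bval_of_noLow prices e.1 (hmem e he).2.1 (hmem e he).2.2).symm

-- ===== VERDICT (by name: the statement is the Claim_ definition above) =====
theorem solution_spec : Claim_equal_solution := by
  intro prices _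
  unfold Spec_solution
  obtain ⟨hlen, hval⟩ := solution_getD prices
  apply List.ext_getElem (by rw [hlen, solution_alt_length])
  intro j h1 h2
  have hj : j < prices.length := by rwa [hlen] at h1
  rw [← List.getD_eq_getElem _ 0 h1, ← List.getD_eq_getElem _ 0 h2,
      hval j hj, solution_alt_getD prices j hj]
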